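-- pv_equiv track=rewrite | github.com/lexiconium/algorithms | programmers/131127.py | solution
-- ===== SOURCE A (Python) =====
-- from collections import Counter
--
-- def solution(want, number, discount):
--     want_counter = Counter()
--
--     for item, num_items in zip(want, number):
--         want_counter[item] = num_items
--
--     discount_counter = Counter(discount[:9])
--     cnt = 0
--
--     for i, item in enumerate(discount[9:]):
--         discount_counter[item] += 1
--
--         if not discount_counter - want_counter:
--             cnt += 1
--
--         discount_counter[discount[i]] -= 1
--
--     return cnt
-- ===== SOURCE B (Python) =====
-- from collections import Counter
--
--
-- def solution(want, number, discount):
--     wanted = dict(zip(want, number))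
--     cnt = 0
--     for i in range(len(discount) - 9):
--         window = Counter(discount[i:i+10])
--         if all(k in wanted for k in window) and \
--            all(window[k] <= v for k, v in wanted.items()):
--             cnt += 1
--     return cnt
-- ===== Notes on version B (the rewrite author's own statement) =====
-- stated objective: faster
-- what changed: Replaces the incrementally maintained sliding Counter tested via CPython's Counter-subtraction by a per-window recomputation: for each start index a fresh Counter of the 10-element slice is built and compared directly against the want dict ('every window item is wanted and no wanted amount is exceeded').
import Mathlib
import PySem

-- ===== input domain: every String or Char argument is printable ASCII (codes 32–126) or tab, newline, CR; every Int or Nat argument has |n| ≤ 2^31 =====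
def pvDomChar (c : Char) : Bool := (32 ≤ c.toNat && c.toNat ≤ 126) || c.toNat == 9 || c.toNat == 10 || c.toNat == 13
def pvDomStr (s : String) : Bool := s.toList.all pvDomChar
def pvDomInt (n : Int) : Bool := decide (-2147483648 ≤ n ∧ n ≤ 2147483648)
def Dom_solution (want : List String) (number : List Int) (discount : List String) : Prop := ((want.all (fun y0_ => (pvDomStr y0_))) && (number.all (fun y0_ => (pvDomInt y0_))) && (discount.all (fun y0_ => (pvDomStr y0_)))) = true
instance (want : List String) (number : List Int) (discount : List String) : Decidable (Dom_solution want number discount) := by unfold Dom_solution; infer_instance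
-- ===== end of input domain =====

-- B rebuilds each 10-element window's Counter from scratch and compares it directly against
-- the want dict, instead of A's incrementally maintained sliding Counter tested through
-- CPython's Counter subtraction; same return value on every input; avoids A's per-step Counter subtraction over all previously seen keys (measured faster).

-- ===== PORT A =====
-- CPython's Counter.__sub__, transliterated: keep positive differences of self's entries,
-- then the negated negative counts of other's keys missing from self.
def counterSub (c w : PySem.Dict String Int) : PySem.Dict String Int :=
  let r := c.items.foldl (fun r p =>
      if 0 < p.2 - w.getD p.1 0 then r.insert p.1 (p.2 - w.getD p.1 0) else r)
    PySem.Dict.empty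
  w.items.foldl (fun r p =>
      if c.contains p.1 = false ∧ p.2 < 0 then r.insert p.1 (0 - p.2) else r) r

def solution (want : List String) (number : List Int) (discount : List String) : Int :=
  let want_counter := (want.zip number).foldl (fun d p => d.insert p.1 p.2) PySem.Dict.empty
  let discount_counter := PySem.Dict.counter (PySem.List.slice discount none (some 9))
  -- `not (discount_counter - want_counter)` is emptiness of the subtraction Counter;
  -- the enumerate index i is always a valid index of discount, so pyGetD with "" is exact.
  ((PySem.List.enumerate (PySem.List.slice discount (some 9) none) 0).foldl
    (fun (s : PySem.Dict String Int × Int) p =>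
      let c := s.1.modify p.2 0 (· + 1)
      let cnt := if (counterSub c want_counter).items.isEmpty then s.2 + 1 else s.2
      (c.modify (PySem.List.pyGetD discount p.1 "") 0 (· - 1), cnt))
    (discount_counter, 0)).2

-- ===== PORT B =====
def solution_alt (want : List String) (number : List Int) (discount : List String) : Int :=
  let wanted := PySem.Dict.ofList (want.zip number)
  (PySem.List.pyRange 0 ((discount.length : Int) - 9)).foldl
    (fun cnt i =>
      let window := PySem.Dict.counter (PySem.List.slice discount (some i) (some (i + 10)))
      if window.keys.all (fun k => wanted.contains k) &&
         wanted.items.all (fun p => decide (window.getD p.1 0 ≤ p.2)) then cnt + 1 else cnt)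
    0

-- ===== PRECONDITION & SPEC =====
def Spec_solution (want : List String) (number : List Int) (discount : List String) (out : Int) : Prop := out = solution_alt want number discount
instance (want : List String) (number : List Int) (discount : List String) (out : Int) : Decidable (Spec_solution want number discount out) := by unfold Spec_solution; infer_instance

-- ===== CLAIM (what is proved, stated in full; the proofs are below) =====
def Claim_equal_solution : Prop := ∀ (want : List String) (number : List Int) (discount : List String), Dom_solution want number discount → Spec_solution want number discount (solution want number discount)

-- ===== LEMMAS AND PROOFS =====

theorem insert_items_ne_nil (d : PySem.Dict String Int) (k : String) (v : Int) :
    (d.insert k v).items ≠ [] := by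
  rw [PySem.Dict.items_insert]
  split
  · rename_i h
    rw [PySem.Dict.contains_eq_isSome_get?] at h
    obtain ⟨v', hv⟩ := Option.isSome_iff_exists.mp h
    have hk := PySem.Dict.mem_items_of_get?_eq_some d hv
    intro hnil
    rw [List.map_eq_nil_iff] at hnil
    rw [hnil] at hk
    exact (List.not_mem_nil hk)
  · simp

theorem foldl_ite_insert_items_nil (P : String × Int → Prop) [DecidablePred P]
    (f : String × Int → String) (g : String × Int → Int) :
    ∀ (l : List (String × Int)) (r : PySem.Dict String Int),
    ((l.foldl (fun r p => if P p then r.insert (f p) (g p) else r) r).items = []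
      ↔ r.items = [] ∧ ∀ p ∈ l, ¬ P p) := by
  intro l
  induction l with
  | nil => simp
  | cons x t ih =>
    intro r
    simp only [List.foldl_cons]
    by_cases hx : P x
    · simp only [if_pos hx]
      rw [ih]
      constructor
      · rintro ⟨h1, -⟩; exact absurd h1 (insert_items_ne_nil _ _ _)
      · rintro ⟨-, h2⟩; exact absurd hx (h2 x (by simp))
    · simp only [if_neg hx]
      rw [ih]
      constructor
      · rintro ⟨h1, h2⟩; exact ⟨h1, by rintro p hp; rcases List.mem_cons.mp hp with rfl | hp; exact hx; exact h2 p hp⟩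
      · rintro ⟨h1, h2⟩; exact ⟨h1, fun p hp => h2 p (List.mem_cons_of_mem _ hp)⟩

theorem counterSub_empty_iff (c w : PySem.Dict String Int) :
    (counterSub c w).items.isEmpty = true
      ↔ (∀ p ∈ c.items, p.2 ≤ w.getD p.1 0) ∧
        (∀ p ∈ w.items, c.contains p.1 = true ∨ 0 ≤ p.2) := by
  unfold counterSub
  rw [List.isEmpty_iff]
  rw [foldl_ite_insert_items_nil (fun p => c.contains p.1 = false ∧ p.2 < 0) (fun p => p.1) (fun p => 0 - p.2)]
  rw [foldl_ite_insert_items_nil (fun p => 0 < p.2 - w.getD p.1 0) (fun p => p.1) (fun p => p.2 - w.getD p.1 0)]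
  constructor
  · rintro ⟨⟨-, h1⟩, h2⟩
    refine ⟨fun p hp => by have := h1 p hp; omega, fun p hp => ?_⟩
    have := h2 p hp
    by_cases hc : c.contains p.1 = true
    · exact Or.inl hc
    · right; push Not at this; have := this (Bool.not_eq_true _ ▸ hc); omega
  · rintro ⟨h1, h2⟩
    refine ⟨⟨rfl, fun p hp => by have := h1 p hp; omega⟩, fun p hp => ?_⟩
    rcases h2 p hp with hc | hv
    · rintro ⟨hf, -⟩; rw [hc] at hf; cases hf
    · rintro ⟨-, hlt⟩; omega

theorem test_iff (W : PySem.Dict String Int) (win : List String)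
    (c : PySem.Dict String Int)
    (hnodc : c.keys.Nodup) (hnodw : W.keys.Nodup)
    (hgetD : ∀ k, c.getD k 0 = (win.count k : Int))
    (hcont : ∀ k ∈ win, c.contains k = true) :
    ((∀ p ∈ c.items, p.2 ≤ W.getD p.1 0) ∧
     (∀ p ∈ W.items, c.contains p.1 = true ∨ 0 ≤ p.2))
    ↔ ((∀ k ∈ win, W.contains k = true) ∧
       (∀ p ∈ W.items, (win.count p.1 : Int) ≤ p.2)) := by
  have hmemc : ∀ k, c.contains k = true → (k, c.getD k 0) ∈ c.items := by
    intro k hk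
    rw [PySem.Dict.items_eq_map_keys c hnodc 0]
    exact List.mem_map.mpr ⟨k, (PySem.Dict.contains_iff_mem_keys c k).mp hk, rfl⟩
  have hmemw : ∀ k, W.contains k = true → (k, W.getD k 0) ∈ W.items := by
    intro k hk
    rw [PySem.Dict.items_eq_map_keys W hnodw 0]
    exact List.mem_map.mpr ⟨k, (PySem.Dict.contains_iff_mem_keys W k).mp hk, rfl⟩
  have hvalc : ∀ p ∈ c.items, p.2 = c.getD p.1 0 := by
    rintro ⟨k, v⟩ hp
    exact (PySem.Dict.getD_of_mem_items c hp hnodc 0).symm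
  have hvalw : ∀ p ∈ W.items, p.2 = W.getD p.1 0 := by
    rintro ⟨k, v⟩ hp
    exact (PySem.Dict.getD_of_mem_items W hp hnodw 0).symm
  have hnotc : ∀ k, ¬ c.contains k = true → (win.count k : Int) = 0 := by
    intro k hk
    have : k ∉ win := fun hm => hk (hcont k hm)
    simp [List.count_eq_zero.mpr this]
  constructor
  · rintro ⟨H1, H2⟩
    constructor
    · intro k hk
      have h1 := H1 _ (hmemc k (hcont k hk))
      rw [hgetD k] at h1
      have hpos : (0:Int) < win.count k := by
        have : 0 < win.count k := List.count_pos_iff.mpr hk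
        exact_mod_cast this
      by_contra hw
      rw [PySem.Dict.getD_of_not_contains W 0 (Bool.not_eq_true _ ▸ hw)] at h1
      omega
    · rintro ⟨k, v⟩ hp
      by_cases hc : c.contains k = true
      · have h1 := H1 _ (hmemc k hc)
        rw [hgetD k] at h1
        have hv := hvalw _ hp
        simp only at hv
        rw [hv]; exact h1
      · have := hnotc k hc
        rcases H2 _ hp with h | h
        · exact absurd h hc
        · simp only at this ⊢; omega
  · rintro ⟨B1, B2⟩
    constructor
    · rintro ⟨k, v⟩ hp
      have hv := hvalc _ hp
      simp only at hv
      rw [hv, hgetD k]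
      by_cases hw : W.contains k = true
      · have := B2 _ (hmemw k hw)
        simpa using this
      · rw [PySem.Dict.getD_of_not_contains W 0 (Bool.not_eq_true _ ▸ hw)]
        have : k ∉ win := fun hm => hw (B1 k hm)
        simp [List.count_eq_zero.mpr this]
    · rintro ⟨k, v⟩ hp
      by_cases hc : c.contains k = true
      · exact Or.inl hc
      · right
        have h2 := B2 _ hp
        have := hnotc k hc
        simp only at h2 this; omega

def wdict (want : List String) (number : List Int) : PySem.Dict String Int :=
  PySem.Dict.ofList (want.zip number)

def win10 (discount : List String) (j : Nat) : List String := (discount.drop j).take 10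

def goodB (want : List String) (number : List Int) (discount : List String) (j : Nat) : Bool :=
  decide (∀ k ∈ win10 discount j, (wdict want number).contains k = true) &&
  decide (∀ p ∈ (wdict want number).items, ((win10 discount j).count p.1 : Int) ≤ p.2)

theorem goodB_iff (want : List String) (number : List Int) (discount : List String) (j : Nat) :
    goodB want number discount j = true
      ↔ ((∀ k ∈ (discount.drop j).take 10, (wdict want number).contains k = true) ∧
         (∀ p ∈ (wdict want number).items, (((discount.drop j).take 10).count p.1 : Int) ≤ p.2)) := by
  unfold goodB win10
  rw [Bool.and_eq_true, decide_eq_true_eq, decide_eq_true_eq]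

theorem win_succR (d : List String) (j : Nat) (h : j + 9 < d.length) :
    (d.drop j).take 10 = (d.drop j).take 9 ++ [d[j+9]] := by
  rw [show (10:Nat) = 9 + 1 from rfl, List.take_add_one, List.getElem?_drop]
  rw [List.getElem?_eq_getElem h]
  rfl

theorem win_consL (d : List String) (j : Nat) (h : j < d.length) :
    (d.drop j).take 10 = d[j] :: (d.drop (j+1)).take 9 := by
  rw [List.drop_eq_getElem_cons h]
  rfl

theorem nodup_keys_modify (d : PySem.Dict String Int) (k : String) (d0 : Int) (f : Int → Int)
    (h : d.keys.Nodup) : (d.modify k d0 f).keys.Nodup := by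
  have := PySem.Dict.keys_modify d k d0 f
  rw [List.Nodup, this]
  exact PySem.Dict.nodup_keys_insert d k _ h

theorem loopA (want : List String) (number : List Int) (discount : List String) :
    ∀ (l : List String) (j : Nat) (c : PySem.Dict String Int) (cnt : Int),
    l = discount.drop (j + 9) →
    c.keys.Nodup →
    (∀ k, c.getD k 0 = (((discount.drop j).take 9).count k : Int)) →
    (∀ k, c.contains k = decide (k ∈ discount.take (j + 9))) →
    ((PySem.List.enumerate l (j : Int)).foldl
      (fun (s : PySem.Dict String Int × Int) p =>
        let c := s.1.modify p.2 0 (· + 1)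
        let cnt := if (counterSub c (wdict want number)).items.isEmpty then s.2 + 1 else s.2
        (c.modify (PySem.List.pyGetD discount p.1 "") 0 (· - 1), cnt))
      (c, cnt)).2
    = cnt + ((List.range' j l.length).countP (fun j => goodB want number discount j) : Int) := by
  intro l
  induction l with
  | nil =>
    intro j c cnt _ _ _ _
    simp [PySem.List.enumerate]
  | cons x t ih =>
    intro j c cnt hl hnod hgetD hcont
    have hlen : j + 9 < discount.length := by
      have h := congrArg List.length hl
      simp only [List.length_cons, List.length_drop] at h
      omega
    have hjlen : j < discount.length := by omega
    rw [List.drop_eq_getElem_cons hlen] at hl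
    injection hl with hx ht
    have ht' : t = discount.drop (j + 1 + 9) := by
      have he : j + 1 + 9 = j + 9 + 1 := by omega
      rw [he, ← ht]
    have henum : PySem.List.enumerate (x :: t) (j : Int)
        = ((j : Int), x) :: PySem.List.enumerate t ((j : Int) + 1) := by
      simp [PySem.List.enumerate]
    have hnodW : (wdict want number).keys.Nodup := PySem.Dict.nodup_keys_ofList _
    have hmid_getD : ∀ k, (c.modify x 0 (· + 1)).getD k 0
        = (((discount.drop j).take 10).count k : Int) := by
      intro k
      rw [PySem.Dict.getD_modify, win_succR discount j hlen, List.count_append]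
      by_cases hk : k = x
      · subst hk
        rw [if_pos rfl, hgetD, ← hx]
        simp
      · rw [if_neg hk, hgetD]
        have h0 : List.count k [discount[j+9]] = 0 := by
          rw [List.count_singleton]
          simp only [beq_iff_eq]
          rw [if_neg (by rw [← hx]; exact fun h => hk h.symm)]
        rw [h0]; simp
    have hmid_cont : ∀ k ∈ (discount.drop j).take 10, (c.modify x 0 (· + 1)).contains k = true := by
      intro k hk
      rw [PySem.Dict.contains_modify]
      rw [win_succR discount j hlen] at hk
      rcases List.mem_append.mp hk with hk | hk
      · have hmem : k ∈ discount.take (j + 9) := by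
          rw [List.take_add]
          exact List.mem_append.mpr (Or.inr hk)
        rw [hcont k]
        simp [hmem]
      · simp only [List.mem_singleton] at hk
        rw [hk, ← hx]
        simp
    have hmid_nod : (c.modify x 0 (· + 1)).keys.Nodup := nodup_keys_modify _ _ _ _ hnod
    have hcond : (counterSub (c.modify x 0 (· + 1)) (wdict want number)).items.isEmpty
        = goodB want number discount j := by
      rw [Bool.eq_iff_iff, counterSub_empty_iff, goodB_iff]
      exact test_iff (wdict want number) _ _ hmid_nod hnodW hmid_getD hmid_cont
    have hgetj : PySem.List.pyGetD discount (j : Int) "" = discount[j] := by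
      rw [PySem.List.pyGetD_natCast, List.getD_eq_getElem _ _ hjlen]
    have hdj : discount[j] ∈ discount.take (j + 9) := by
      rw [List.take_add]
      refine List.mem_append.mpr (Or.inr ?_)
      rw [List.drop_eq_getElem_cons hjlen,
        show (9:Nat) = 8 + 1 from rfl, List.take_succ_cons]
      exact List.mem_cons_self
    have hc2_getD : ∀ k, ((c.modify x 0 (· + 1)).modify discount[j] 0 (· - 1)).getD k 0
        = (((discount.drop (j+1)).take 9).count k : Int) := by
      intro k
      have hw : List.count k ((discount.drop j).take 10)
          = (if k = discount[j] then 1 else 0) + List.count k ((discount.drop (j+1)).take 9) := by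
        rw [win_consL discount j hjlen, List.count_cons]
        by_cases hk : k = discount[j]
        · subst hk; simp; omega
        · have hk' : ¬ discount[j] = k := fun h => hk h.symm
          simp [hk, hk']
      rw [PySem.Dict.getD_modify]
      by_cases hk : k = discount[j]
      · subst hk
        rw [if_pos rfl, hmid_getD, hw, if_pos rfl]
        push_cast; ring
      · rw [if_neg hk, hmid_getD, hw, if_neg hk]
        push_cast; ring
    have hmemtk : ∀ k, k ∈ discount.take (j + 1 + 9)
        ↔ (k ∈ discount.take (j + 9) ∨ k = discount[j+9]) := by
      intro k
      rw [show j + 1 + 9 = (j + 9) + 1 by omega, List.take_add_one,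
        List.getElem?_eq_getElem hlen]
      simp only [Option.toList_some, List.mem_append, List.mem_singleton]
    have hc2_cont : ∀ k, ((c.modify x 0 (· + 1)).modify discount[j] 0 (· - 1)).contains k
        = decide (k ∈ discount.take (j + 1 + 9)) := by
      intro k
      rw [PySem.Dict.contains_modify, PySem.Dict.contains_modify, hcont k]
      by_cases h1 : k = discount[j]
      · simp [h1, hmemtk, hdj]
      · by_cases h2 : k = x
        · simp [h2, ← hx, hmemtk]
        · have h2' : ¬ k = discount[j+9] := by rw [← hx]; exact h2
          rw [beq_eq_false_iff_ne.mpr h1, beq_eq_false_iff_ne.mpr h2]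
          simp [h2', hmemtk]
    have hc2_nod : ((c.modify x 0 (· + 1)).modify discount[j] 0 (· - 1)).keys.Nodup :=
      nodup_keys_modify _ _ _ _ hmid_nod
    have hstep := ih (j+1) ((c.modify x 0 (· + 1)).modify discount[j] 0 (· - 1))
      (if (counterSub (c.modify x 0 (· + 1)) (wdict want number)).items.isEmpty then cnt + 1 else cnt)
      ht' hc2_nod hc2_getD hc2_cont
    push_cast at hstep
    rw [henum, List.foldl_cons]
    simp only [hgetj]
    refine hstep.trans ?_
    simp only [List.length_cons]
    rw [List.range'_succ, List.countP_cons]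
    rw [hcond]
    by_cases hg : goodB want number discount j = true
    · rw [if_pos hg, if_pos (by simpa using hg)]
      push_cast; ring
    · rw [if_neg hg, if_neg (by simpa using hg)]
      push_cast; ring

theorem condB_eq (want : List String) (number : List Int) (discount : List String) (j : Nat) :
    ((PySem.Dict.counter (PySem.List.slice discount (some (j:Int)) (some ((j:Int) + 10)))).keys.all
        (fun k => (wdict want number).contains k) &&
     (wdict want number).items.all
        (fun p => decide ((PySem.Dict.counter (PySem.List.slice discount (some (j:Int)) (some ((j:Int) + 10)))).getD p.1 0 ≤ p.2)))
    = goodB want number discount j := by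
  have hsl : PySem.List.slice discount (some (j:Int)) (some ((j:Int) + 10)) = win10 discount j := by
    rw [show ((j:Int) + 10) = ((j + 10 : Nat) : Int) by push_cast; ring, PySem.List.slice_natCast]
    unfold win10
    congr 1
    omega
  rw [hsl]
  rw [Bool.eq_iff_iff]
  rw [Bool.and_eq_true, goodB_iff]
  unfold win10
  constructor
  · rintro ⟨h1, h2⟩
    constructor
    · intro k hk
      have hk2 : k ∈ (PySem.Dict.counter (win10 discount j)).keys := by
        rw [PySem.Dict.keys_counter]
        exact (PySem.Set.mem_ofList _ k).mpr hk
      exact List.all_eq_true.mp h1 k hk2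
    · intro p hp
      have := List.all_eq_true.mp h2 p hp
      rw [decide_eq_true_eq, PySem.Dict.getD_counter] at this
      exact this
  · rintro ⟨h1, h2⟩
    constructor
    · refine List.all_eq_true.mpr fun k hk => ?_
      rw [PySem.Dict.keys_counter] at hk
      exact h1 k ((PySem.Set.mem_ofList _ k).mp hk)
    · refine List.all_eq_true.mpr fun p hp => ?_
      rw [decide_eq_true_eq, PySem.Dict.getD_counter]
      exact h2 p hp

theorem loopB (want : List String) (number : List Int) (discount : List String) :
    solution_alt want number discount
      = (((List.range (discount.length - 9)).countP
            (fun j => goodB want number discount j)) : Int) := by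
  unfold solution_alt
  rw [PySem.List.pyRange_of_pos 0 ((discount.length:Int) - 9) (by norm_num)]
  have hn : (if (0:Int) < (discount.length:Int) - 9
        then ((((discount.length:Int) - 9) - 0 + 1 - 1)/1).toNat else 0)
      = discount.length - 9 := by
    split <;> omega
  rw [hn, List.foldl_map]
  refine (PySem.List.foldl_congr_mem _ _
    (fun cnt j => if goodB want number discount j then cnt + 1 else cnt) _ ?_).trans ?_
  · intro acc j _
    simp only
    rw [show (0 : Int) + 1 * (j:Int) = (j:Int) by ring]
    rw [show (PySem.Dict.ofList (want.zip number)) = wdict want number from rfl,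
      condB_eq want number discount j]
  · rw [PySem.List.foldl_if_add_one]
    simp

theorem solution_eq_count (want : List String) (number : List Int) (discount : List String) :
    (((PySem.List.enumerate (PySem.List.slice discount (some 9) none) 0)).foldl
      (fun (s : PySem.Dict String Int × Int) p =>
        let c := s.1.modify p.2 0 (· + 1)
        let cnt := if (counterSub c (wdict want number)).items.isEmpty then s.2 + 1 else s.2
        (c.modify (PySem.List.pyGetD discount p.1 "") 0 (· - 1), cnt))
      (PySem.Dict.counter (PySem.List.slice discount none (some 9)), 0)).2
    = (((List.range (discount.length - 9)).countP
          (fun j => goodB want number discount j)) : Int) := by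
  have hsl9 : PySem.List.slice discount (some 9) none = discount.drop 9 := by
    rw [PySem.List.slice_from discount (by norm_num : (0:Int) ≤ 9)]
    rfl
  have hslt : PySem.List.slice discount none (some 9) = discount.take 9 := by
    rw [PySem.List.slice_to discount (by norm_num : (0:Int) ≤ 9)]
    rfl
  have h := loopA want number discount (discount.drop 9) 0
    (PySem.Dict.counter (discount.take 9)) 0
    (by simp)
    (PySem.Dict.nodup_keys_counter _)
    (by intro k; rw [PySem.Dict.getD_counter]; simp)
    (by intro k; rw [PySem.Dict.contains_counter]; simp [List.contains_eq_mem])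
  rw [hsl9, hslt]
  rw [show ((0:Nat):Int) = (0:Int) from rfl] at h
  rw [h]
  rw [List.length_drop, ← List.range_eq_range']
  simp


theorem wc_eq (want : List String) (number : List Int) :
    (want.zip number).foldl (fun d p => d.insert p.1 p.2) PySem.Dict.empty
      = wdict want number := rfl

-- ===== VERDICT (by name: the statement is the Claim_ definition above) =====
theorem solution_spec : Claim_equal_solution := by
  intro want number discount _
  unfold Spec_solution
  show solution want number discount = solution_alt want number discount
  unfold solution
  simp only []
  rw [wc_eq]
  rw [solution_eq_count]
  exact (loopB want number discount).symm
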